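-- pv_equiv track=rewrite | github.com/esheldon/esutil | trunk/esutil/misc.py | dict_select
-- ===== SOURCE A (Python) =====
-- def dict_select(input_dict, keep=None, remove=None):
--     """
--     Name:
--         dict_select
--     Purpose:
--         Select a subset of keys from the input dict.
--
--     Calling Sequence:
--         newdict = dict_select(input_dict, keep=all, remove=[])
--
--     Inputs:
--         dict: the input dictionary.
--
--     Optional Inputs:
--         keep=None:
--             A list of keys to keep. If the input is None or [] all keys are
--             returned that are not in the remove list.  Default [].
--
--         remove=None:
--             A list of keys to ignore.  Defaults to [].
--
--     """
--
--     outdict={}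
--
--     if keep is None:
--         keep = []
--     if remove is None:
--         remove = []
--
--     if len(keep) == 0:
--         # wrap in list() for py3k in which keys() does not return a list.
--         keep = list( input_dict.keys() )
--
--     for key in keep:
--         if key in input_dict and key not in remove:
--             outdict[key] = input_dict[key]
--
--     return outdict
-- ===== SOURCE B (Python) =====
-- def dict_select(input_dict, keep=None, remove=None):
--     # Build-then-prune: copy the selected entries first, then pop each removed key.
--     if keep:
--         out = {k: input_dict[k] for k in keep if k in input_dict}
--     else:
--         out = dict(input_dict)
--     for k in (remove or []):
--         out.pop(k, None)
--     return out
-- ===== Notes on version B (the rewrite author's own statement) =====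
-- stated objective: alternative
-- what changed: A filters in a single pass that tests every kept key against the remove list; B first builds the selected dict (a copy, or a comprehension over keep) and then prunes it with one pop per key of remove.
import Mathlib
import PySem

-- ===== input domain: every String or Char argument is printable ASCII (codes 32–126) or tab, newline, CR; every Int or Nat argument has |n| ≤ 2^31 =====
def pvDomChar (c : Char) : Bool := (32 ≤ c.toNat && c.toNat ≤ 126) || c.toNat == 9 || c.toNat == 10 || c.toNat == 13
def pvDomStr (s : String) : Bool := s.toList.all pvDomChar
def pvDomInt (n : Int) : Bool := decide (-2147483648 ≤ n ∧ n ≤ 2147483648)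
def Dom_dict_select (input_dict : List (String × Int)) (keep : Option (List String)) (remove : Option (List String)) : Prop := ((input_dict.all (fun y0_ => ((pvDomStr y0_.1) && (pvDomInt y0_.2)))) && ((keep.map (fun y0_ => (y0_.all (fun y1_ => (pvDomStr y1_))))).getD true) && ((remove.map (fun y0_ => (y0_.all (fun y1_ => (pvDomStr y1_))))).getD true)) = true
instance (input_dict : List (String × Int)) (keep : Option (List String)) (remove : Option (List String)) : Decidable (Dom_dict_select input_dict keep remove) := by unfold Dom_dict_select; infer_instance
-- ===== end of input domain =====

-- B builds the selected dict first and then pops each removed key, instead of A's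
-- single pass that scans the remove list for every kept key; return values agree everywhere.

-- ===== PORT A =====
def dict_select (input_dict : List (String × Int)) (keep : Option (List String)) (remove : Option (List String)) : List (String × Int) :=
  let d := PySem.Dict.ofList input_dict
  let keep1 := keep.getD []
  let remove1 := remove.getD []
  let keep2 := if keep1.length = 0 then d.keys else keep1
  (keep2.foldl (fun (outdict : PySem.Dict String Int) key =>
      if d.contains key && !(remove1.contains key) then outdict.insert key (d.getD key 0)
      else outdict) PySem.Dict.empty).items

-- ===== PORT B =====
def dict_select_alt (input_dict : List (String × Int)) (keep : Option (List String)) (remove : Option (List String)) : List (String × Int) :=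
  let d := PySem.Dict.ofList input_dict
  let out :=
    match keep with
    | some ks =>
        if ks.length ≠ 0 then
          ks.foldl (fun (o : PySem.Dict String Int) k => if d.contains k then o.insert k (d.getD k 0) else o) PySem.Dict.empty
        else d
    | none => d
  ((remove.getD []).foldl (fun (o : PySem.Dict String Int) k => o.erase k) out).items

-- ===== PRECONDITION & SPEC =====
def Spec_dict_select (input_dict : List (String × Int)) (keep : Option (List String)) (remove : Option (List String)) (out : List (String × Int)) : Prop := out = dict_select_alt input_dict keep remove
instance (input_dict : List (String × Int)) (keep : Option (List String)) (remove : Option (List String)) (out : List (String × Int)) : Decidable (Spec_dict_select input_dict keep remove out) := by unfold Spec_dict_select; infer_instance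

-- ===== CLAIM (what is proved, stated in full; the proofs are below) =====
def Claim_equal_dict_select : Prop := ∀ (input_dict : List (String × Int)) (keep : Option (List String)) (remove : Option (List String)), Dom_dict_select input_dict keep remove → Spec_dict_select input_dict keep remove (dict_select input_dict keep remove)

-- ===== LEMMAS AND PROOFS =====

-- a chain of erases is one filter of the items list
lemma eraseFold_items (r : List String) : ∀ (o : PySem.Dict String Int),
    (r.foldl (fun (o : PySem.Dict String Int) k => o.erase k) o).items
      = o.items.filter (fun p => !r.contains p.1) := by
  induction r with
  | nil => intro o; simp
  | cons k r ih =>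
    intro o
    rw [List.foldl_cons, ih]
    simp only [PySem.Dict.erase, List.filter_filter]
    apply List.filter_congr
    intro p _
    by_cases h : p.1 = k <;> simp [h]

-- replacing-in-place entries at a key the filter drops does not change the filtered items
lemma filter_map_replace (q : String → Bool) (k : String) (v : Int) (hq : q k = true) :
    ∀ (l : List (String × Int)),
    (l.map (fun p => if p.1 == k then (k, v) else p)).filter (fun p => !q p.1)
      = l.filter (fun p => !q p.1) := by
  intro l
  induction l with
  | nil => rfl
  | cons p l ih =>
    by_cases h : p.1 = k
    · simpa [h, hq] using ih
    · by_cases h2 : q p.1 <;> simpa [h, h2] using ih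

-- replacing-in-place at a key the filter keeps commutes with the filter
lemma filter_map_comm (q : String → Bool) (k : String) (v : Int) (hq : q k = false) :
    ∀ (l : List (String × Int)),
    (l.map (fun p => if p.1 == k then (k, v) else p)).filter (fun p => !q p.1)
      = (l.filter (fun p => !q p.1)).map (fun p => if p.1 == k then (k, v) else p) := by
  intro l
  induction l with
  | nil => rfl
  | cons p l ih =>
    by_cases h : p.1 = k
    · simpa [h, hq] using ih
    · by_cases h2 : q p.1 <;> simpa [h, h2] using ih

-- presence of a key the filter keeps is unchanged by the filter
lemma any_filter_eq (q : String → Bool) (k : String) (hq : q k = false) :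
    ∀ (l : List (String × Int)),
    (l.filter (fun p => !q p.1)).any (fun p => p.1 == k) = l.any (fun p => p.1 == k) := by
  intro l
  induction l with
  | nil => rfl
  | cons p l ih =>
    by_cases h : p.1 = k
    · simp [h, hq]
    · by_cases h2 : q p.1 <;> simp [h, h2, ih]

-- main invariant: A's filtering fold tracks B's plain fold through the remove-filter
lemma fold_invariant (d : PySem.Dict String Int) (r : List String) :
    ∀ (ks : List String) (oA oB : PySem.Dict String Int),
    oA.items = oB.items.filter (fun p => !r.contains p.1) →
    (ks.foldl (fun (outdict : PySem.Dict String Int) key =>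
        if d.contains key && !(r.contains key) then outdict.insert key (d.getD key 0)
        else outdict) oA).items
      = ((ks.foldl (fun (o : PySem.Dict String Int) k =>
          if d.contains k then o.insert k (d.getD k 0) else o) oB).items).filter
          (fun p => !r.contains p.1) := by
  intro ks
  induction ks with
  | nil => intro oA oB h; simpa using h
  | cons k ks ih =>
    intro oA oB h
    simp only [List.foldl_cons]
    apply ih
    by_cases hd : d.contains k = true
    · rw [if_pos hd]
      by_cases hr : r.contains k = true
      · -- A skips, B inserts an entry the filter drops
        have hr' : k ∈ r := by simpa using hr
        rw [if_neg (by simp [hd, hr']), h]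
        unfold PySem.Dict.insert
        by_cases hc : oB.contains k = true
        · rw [if_pos hc]
          exact (filter_map_replace (fun s => r.contains s) k (d.getD k 0) hr oB.items).symm
        · rw [if_neg hc, List.filter_append]
          have : List.filter (fun p => !r.contains p.1) [(k, d.getD k 0)] = [] := by
            simp [List.filter, hr']
          rw [this, List.append_nil]
      · -- both insert; containment status agrees via any_filter_eq
        have hr' : k ∉ r := by simpa using hr
        rw [if_pos (by simp [hd, hr'])]
        have hrf : r.contains k = false := by simpa using hr
        have hcc : oA.contains k = oB.contains k := by
          unfold PySem.Dict.contains
          rw [h]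
          exact any_filter_eq (fun s => r.contains s) k hrf oB.items
        unfold PySem.Dict.insert
        by_cases hc : oB.contains k = true
        · rw [if_pos hc, if_pos (hcc.trans hc)]
          show _ = List.filter (fun p => !r.contains p.1)
              (oB.items.map (fun p => if p.1 == k then (k, d.getD k 0) else p))
          rw [filter_map_comm (fun s => r.contains s) k (d.getD k 0) hrf oB.items, h]
        · rw [if_neg hc, if_neg (by rw [hcc]; exact hc)]
          show oA.items ++ [(k, d.getD k 0)]
              = List.filter (fun p => !r.contains p.1) (oB.items ++ [(k, d.getD k 0)])
          rw [List.filter_append, h]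
          have : List.filter (fun p => !r.contains p.1) [(k, d.getD k 0)] = [(k, d.getD k 0)] := by
            simp [List.filter, hr']
          rw [this]
    · rw [if_neg (by simp [hd]), if_neg hd]
      exact h

-- B's guarded insertion fold over the dict's own keys rebuilds the dict
lemma rebuild_keys (d : PySem.Dict String Int) (hnd : d.keys.Nodup) :
    (d.keys.foldl (fun (o : PySem.Dict String Int) k =>
        if d.contains k then o.insert k (d.getD k 0) else o) PySem.Dict.empty).items = d.items := by
  have hcong : d.keys.foldl (fun (o : PySem.Dict String Int) k =>
        if d.contains k then o.insert k (d.getD k 0) else o) PySem.Dict.empty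
      = d.keys.foldl (fun (o : PySem.Dict String Int) k => o.insert k (d.getD k 0))
          PySem.Dict.empty := by
    apply PySem.List.foldl_congr_mem
    intro o k hk
    have : d.contains k = true := (PySem.Dict.contains_iff_mem_keys d k).2 hk
    simp [this]
  rw [hcong]
  rw [PySem.Dict.items_foldl_insert_fresh (k := fun k => k) (v := fun k => d.getD k 0)
      (d := PySem.Dict.empty) (l := d.keys) (by intro a _; simp) (by simpa using hnd)]
  simp [PySem.Dict.empty, PySem.Dict.items_eq_map_keys d hnd 0]

-- ===== VERDICT (by name: the statement is the Claim_ definition above) =====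
theorem dict_select_spec : Claim_equal_dict_select := by
  intro input_dict keep remove _
  unfold Spec_dict_select
  simp only [dict_select, dict_select_alt]
  have hnd : (PySem.Dict.ofList input_dict).keys.Nodup := PySem.Dict.nodup_keys_ofList input_dict
  rw [eraseFold_items]
  match keep with
  | none =>
      simp only [Option.getD_none, List.length_nil,]
      rw [← rebuild_keys (PySem.Dict.ofList input_dict) hnd]
      exact fold_invariant _ _ _ PySem.Dict.empty PySem.Dict.empty (by simp [PySem.Dict.empty])
  | some ks =>
      match ks with
      | [] =>
          simp only [Option.getD_some, List.length_nil, ne_eq, not_true_eq_false, if_false,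
           ]
          rw [← rebuild_keys (PySem.Dict.ofList input_dict) hnd]
          exact fold_invariant _ _ _ PySem.Dict.empty PySem.Dict.empty (by simp [PySem.Dict.empty])
      | k :: ks =>
          simp only [Option.getD_some, List.length_cons, ne_eq]
          rw [if_neg (by omega), if_pos (by omega)]
          exact fold_invariant _ _ _ PySem.Dict.empty PySem.Dict.empty (by simp [PySem.Dict.empty])
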